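-- pv_equiv track=rewrite | github.com/JRicardopp/PythonProjects | binaryGap/binary.gap.py | max_zeros
-- ===== SOURCE A (Python) =====
-- def max_zeros(binario):
--     maxm = -1
--     cnt = 0
--
--     while(binario):
--
--         if(not(binario & 1)):
--             cnt += 1
--             binario >>= 1
--             maxm = max(maxm,cnt)
--         else:
--             maxm = max(maxm,cnt)
--             cnt = 0
--             binario >>= 1
--
--     return maxm
-- ===== SOURCE B (Python) =====
-- def max_zeros(binario):
--     if binario == 0:
--         return -1
--     return max(len(chunk) for chunk in bin(binario)[2:].split('1'))
-- ===== Notes on version B (the rewrite author's own statement) =====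
-- stated objective: idiomatic
-- what changed: Replaces the bit-shift while-loop with zero-run counter by a max over the chunk lengths of bin(binario)[2:].split('1').
-- outside the precondition, e.g. on max_zeros(-1): A does not finish within the time limit, B returns 1
import Mathlib
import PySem

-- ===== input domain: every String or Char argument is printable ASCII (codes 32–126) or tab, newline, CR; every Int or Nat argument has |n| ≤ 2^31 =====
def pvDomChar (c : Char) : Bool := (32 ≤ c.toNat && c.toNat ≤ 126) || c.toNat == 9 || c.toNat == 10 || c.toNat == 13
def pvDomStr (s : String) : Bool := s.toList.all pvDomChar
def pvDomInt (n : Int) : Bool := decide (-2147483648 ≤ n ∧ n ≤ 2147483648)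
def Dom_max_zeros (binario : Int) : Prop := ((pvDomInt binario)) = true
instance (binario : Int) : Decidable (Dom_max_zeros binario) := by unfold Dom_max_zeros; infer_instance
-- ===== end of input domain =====

-- B computes the longest run of '0' characters of bin(binario)[2:] via split('1')
-- instead of A's bit-shift counting loop; equal values proved for binario ≥ 0
-- (A never terminates on negative input, so those lie outside Pre_).

-- ===== PORT A =====
-- A's while-loop over `binario`, shifting right each step; recursion on the Nat
-- value (binario ≥ 0 inside Pre_), n >>> 1 = n / 2.
def pvLoopA (n : Nat) (maxm cnt : Int) : Int :=
  if h : n = 0 then maxm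
  else if n % 2 = 0 then
    pvLoopA (n / 2) (max maxm (cnt + 1)) (cnt + 1)
  else
    pvLoopA (n / 2) (max maxm cnt) 0
termination_by n
decreasing_by all_goals exact Nat.div_lt_self (Nat.pos_of_ne_zero h) one_lt_two

def max_zeros (binario : Int) : Int := pvLoopA binario.toNat (-1) 0

-- ===== PORT B =====
-- bin(binario)[2:] as a list of chars, most significant bit first.
def pvBinChars (n : Nat) : List Char :=
  if h : n = 0 then []
  else pvBinChars (n / 2) ++ [if n % 2 = 0 then '0' else '1']
termination_by n
decreasing_by exact Nat.div_lt_self (Nat.pos_of_ne_zero h) one_lt_two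

def max_zeros_alt (binario : Int) : Int :=
  if binario = 0 then -1
  else ((pvBinChars binario.toNat).splitOn '1').foldl
        (fun m chunk => max m (chunk.length : Int)) 0

-- ===== PRECONDITION & SPEC =====
-- Pre_ excludes binario < 0: there A's loop never terminates (binario >>= 1 is -1 forever).
def Pre_max_zeros (binario : Int) : Prop := 0 ≤ binario
instance (binario : Int) : Decidable (Pre_max_zeros binario) := by unfold Pre_max_zeros; infer_instance
def pvWitness_max_zeros : Int := (6)

def Spec_max_zeros (binario : Int) (out : Int) : Prop := out = max_zeros_alt binario
instance (binario : Int) (out : Int) : Decidable (Spec_max_zeros binario out) := by unfold Spec_max_zeros; infer_instance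

-- ===== CLAIM (what is proved, stated in full; the proofs are below) =====
def Claim_equal_max_zeros : Prop := ∀ (binario : Int), Dom_max_zeros binario → Pre_max_zeros binario → Spec_max_zeros binario (max_zeros binario)

-- ===== LEMMAS AND PROOFS =====

-- the zero-run lengths of the binary digits of n (lsb side first), with c
-- pending zeros already seen below the current position
def pvRuns (n : Nat) (c : Nat) : List Nat :=
  if h : n = 0 then [c]
  else if n % 2 = 0 then pvRuns (n / 2) (c + 1)
  else c :: pvRuns (n / 2) 0
termination_by n
decreasing_by all_goals exact Nat.div_lt_self (Nat.pos_of_ne_zero h) one_lt_two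

-- the fold both sides boil down to
def pvF (m : Int) (x : Nat) : Int := max m (x : Int)

theorem pvFold_pull (l : List Nat) (m a : Int) :
    l.foldl pvF (max m a) = max (l.foldl pvF m) a := by
  induction l generalizing m with
  | nil => rfl
  | cons x l ih =>
    have e : pvF (max m a) x = max (pvF m x) a := max_right_comm m a (x : Int)
    rw [List.foldl_cons, List.foldl_cons, e]
    exact ih _

theorem pvFold_le (l : List Nat) (m : Int) : m ≤ l.foldl pvF m := by
  induction l generalizing m with
  | nil => exact le_refl m
  | cons x l ih => exact le_trans (le_max_left m (x : Int)) (ih _)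

theorem pvFold_mem (l : List Nat) (m : Int) (x : Nat) (hx : x ∈ l) :
    (x : Int) ≤ l.foldl pvF m := by
  induction l generalizing m with
  | nil => cases hx
  | cons y l ih =>
    rcases List.mem_cons.1 hx with h | h
    · subst h
      exact le_trans (le_max_right m (x : Int)) (pvFold_le l _)
    · exact ih _ h

theorem pvRuns_mem (n c : Nat) : ∃ x ∈ pvRuns n c, c ≤ x := by
  induction n using Nat.strong_induction_on generalizing c with
  | _ n ih =>
    rw [pvRuns]
    by_cases h : n = 0
    · exact ⟨c, by simp [h], le_refl c⟩
    · simp only [h, dif_neg, not_false_iff]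
      by_cases he : n % 2 = 0
      · simp only [he, if_pos]
        obtain ⟨x, hx, hle⟩ := ih (n / 2) (Nat.div_lt_self (Nat.pos_of_ne_zero h) one_lt_two) (c + 1)
        exact ⟨x, hx, le_trans (Nat.le_succ c) hle⟩
      · simp only [he, if_neg, not_false_iff]
        exact ⟨c, List.mem_cons_self, le_refl c⟩

theorem pvLoopA_eq (n : Nat) (maxm : Int) (c : Nat) (h : n ≠ 0) :
    pvLoopA n maxm (c : Int) = (pvRuns n c).foldl pvF maxm := by
  induction n using Nat.strong_induction_on generalizing maxm c with
  | _ n ih =>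
    rw [pvLoopA, pvRuns]
    simp only [h, dif_neg, not_false_iff]
    have hdiv : n / 2 < n := Nat.div_lt_self (Nat.pos_of_ne_zero h) one_lt_two
    by_cases he : n % 2 = 0
    · -- even bit
      simp only [he, if_pos]
      have hhalf : n / 2 ≠ 0 := by omega
      have : (c : Int) + 1 = ((c + 1 : Nat) : Int) := by push_cast; ring
      rw [this, ih (n / 2) hdiv _ _ hhalf, pvFold_pull]
      obtain ⟨x, hx, hle⟩ := pvRuns_mem (n / 2) (c + 1)
      have h1 : ((c + 1 : Nat) : Int) ≤ (pvRuns (n / 2) (c + 1)).foldl pvF maxm :=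
        le_trans (by exact_mod_cast hle) (pvFold_mem _ _ _ hx)
      exact max_eq_left h1
    · -- odd bit
      simp only [he, if_neg, not_false_iff]
      by_cases h1 : n / 2 = 0
      · -- n = 1
        rw [h1, pvLoopA, pvRuns]
        simp only [dif_pos]
        simp only [List.foldl_cons, List.foldl_nil, pvF]
        have : (0 : Int) ≤ max maxm (c : Int) :=
          le_trans (Int.natCast_nonneg c) (le_max_right _ _)
        exact (max_eq_left this).symm
      · rw [show (0 : Int) = ((0 : Nat) : Int) by norm_num, ih (n / 2) hdiv _ _ h1]
        rfl

theorem pvReplicate_no_one (c : Nat) (x : Char) (hx : x ∈ List.replicate c '0') :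
    ¬ ((x == '1') = true) := by
  rw [List.eq_of_mem_replicate hx]; decide

theorem pvSplitOn_runs (n c : Nat) :
    ((pvBinChars n ++ List.replicate c '0').splitOn '1').map List.length = (pvRuns n c).reverse := by
  induction n using Nat.strong_induction_on generalizing c with
  | _ n ih =>
    rw [pvBinChars, pvRuns]
    by_cases h : n = 0
    · simp only [h, dif_pos, List.nil_append, List.splitOn]
      rw [List.splitOnP_eq_single _ _ (pvReplicate_no_one c)]
      simp
    · simp only [h, dif_neg, not_false_iff]
      have hdiv : n / 2 < n := Nat.div_lt_self (Nat.pos_of_ne_zero h) one_lt_two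
      by_cases he : n % 2 = 0
      · -- last digit '0': absorb it into the run of trailing zeros
        simp only [he, if_pos]
        rw [List.append_assoc, show ['0'] ++ List.replicate c '0' = List.replicate (c + 1) '0' by
          simp [List.replicate_succ]]
        exact ih (n / 2) hdiv (c + 1)
      · -- last digit '1': split there
        simp only [he, if_neg, not_false_iff]
        rw [List.append_assoc, List.singleton_append, List.splitOn,
          List.splitOnP_append_cons _ _ _ _ (by decide),
          List.splitOnP_eq_single _ _ (pvReplicate_no_one c)]
        by_cases h1 : n / 2 = 0
        · rw [h1]
          simp [pvBinChars, pvRuns]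
        · have := ih (n / 2) hdiv 0
          simp only [List.replicate_zero, List.append_nil, List.splitOn] at this
          simp [this]

theorem pvFold_rev (l : List Nat) (m : Int) : l.reverse.foldl pvF m = l.foldl pvF m := by
  induction l generalizing m with
  | nil => rfl
  | cons x l ih =>
    rw [List.reverse_cons, List.foldl_append, ih, List.foldl_cons]
    simp only [List.foldl_cons, List.foldl_nil]
    exact (pvFold_pull l m (x : Int)).symm

-- ===== VERDICT (by name: the statement is the Claim_ definition above) =====
theorem max_zeros_spec : Claim_equal_max_zeros := by
  intro b _ hpre
  unfold Spec_max_zeros max_zeros max_zeros_alt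
  by_cases hb : b = 0
  · subst hb
    simp [pvLoopA]
  · have hn : b.toNat ≠ 0 := by
      unfold Pre_max_zeros at hpre
      omega
    simp only [hb, if_neg, not_false_iff]
    have hA : pvLoopA b.toNat (-1) 0 = (pvRuns b.toNat 0).foldl pvF (-1) := by
      have := pvLoopA_eq b.toNat (-1) 0 hn
      simpa using this
    have hsp : ((pvBinChars b.toNat).splitOn '1').map List.length = (pvRuns b.toNat 0).reverse := by
      simpa using pvSplitOn_runs b.toNat 0
    have hB : ((pvBinChars b.toNat).splitOn '1').foldl
        (fun m chunk => max m (chunk.length : Int)) 0 = (pvRuns b.toNat 0).foldl pvF 0 := by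
      have h1 : ((pvBinChars b.toNat).splitOn '1').foldl
          (fun m chunk => max m (chunk.length : Int)) 0
          = (((pvBinChars b.toNat).splitOn '1').map List.length).foldl pvF 0 :=
        (List.foldl_map (f := List.length) (g := pvF)).symm
      rw [h1, hsp, pvFold_rev]
    rw [hA, hB]
    -- fold from -1 equals fold from 0: the run list has a nonnegative element
    obtain ⟨x, hx, _⟩ := pvRuns_mem b.toNat 0
    have h0 : (0 : Int) ≤ (pvRuns b.toNat 0).foldl pvF (-1) :=
      le_trans (Int.natCast_nonneg x) (pvFold_mem _ _ _ hx)
    rw [show (0 : Int) = max (-1) 0 by norm_num, pvFold_pull, max_eq_left h0]
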